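-- pv_equiv track=rewrite | github.com/zxh0/luago-book | code/python/ch17/src/lua_value.py | int2fb
-- ===== SOURCE A (Python) =====
-- def int2fb(val):
--     e = 0
--     if val < 8:
--         return val
--
--     while val >= (8 << 4):
--         val = (val + 0xf) >> 4
--         e += 4
--
--     while val >= (8 << 1):
--         val = (val + 1) >> 1
--         e += 1
--
--     return ((e + 1) << 3) | (val - 8)
-- ===== SOURCE B (Python) =====
-- def int2fb(val):
--     if val < 8:
--         return val
--     e = max(val.bit_length() - 4, 0)
--     if (15 << e) < val:
--         e += 1
--     m = (val + (1 << e) - 1) >> e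
--     return ((e + 1) << 3) | (m - 8)
-- ===== Notes on version B (the rewrite author's own statement) =====
-- stated objective: simpler
-- what changed: Replaces A's two iterative round-and-carry normalization loops with a closed-form exponent computed from val.bit_length() (adjusted by one boundary test) and a single ceiling division for the mantissa.
import Mathlib
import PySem

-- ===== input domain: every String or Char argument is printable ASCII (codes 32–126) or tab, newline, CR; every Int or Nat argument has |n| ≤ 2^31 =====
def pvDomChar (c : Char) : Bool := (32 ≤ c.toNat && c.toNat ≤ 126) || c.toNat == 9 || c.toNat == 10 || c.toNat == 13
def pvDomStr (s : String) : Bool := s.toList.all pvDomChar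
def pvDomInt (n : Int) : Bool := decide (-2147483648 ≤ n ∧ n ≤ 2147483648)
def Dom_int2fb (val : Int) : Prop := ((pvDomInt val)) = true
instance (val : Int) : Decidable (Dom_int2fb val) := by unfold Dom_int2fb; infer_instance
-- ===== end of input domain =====

-- B replaces A's two iterative round-and-carry loops by a closed-form exponent from bit_length
-- and a single ceiling division (objective: simpler).


-- ===== PORT A =====
-- Python's `x >> k` / `x << k` (k a nonnegative literal) is Lean's arithmetic shift `>>> (k:Nat)` /
-- `<<< (k:Nat)` on Int, and Python's `|` is Int.lor: exact on all ints.
-- Termination helpers for the two while loops (the loop value strictly decreases while ≥ the bound):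
theorem int2fb_shl84 : (8:Int) <<< (4:Nat) = 128 := by decide
theorem int2fb_shl81 : (8:Int) <<< (1:Nat) = 16 := by decide

theorem int2fbDec4 (val : Int) (h : (8:Int) <<< (4:Nat) ≤ val) :
    ((val + 15) >>> (4:Nat)).toNat < val.toNat := by
  have h128 : (128:Int) ≤ val := by rw [int2fb_shl84] at h; omega
  have hs : (val + 15) >>> (4:Nat) = (val + 15) / 16 := by
    simpa using Int.shiftRight_eq_div_pow (val + 15) 4
  rw [hs]; omega

theorem int2fbDec1 (val : Int) (h : (8:Int) <<< (1:Nat) ≤ val) :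
    ((val + 1) >>> (1:Nat)).toNat < val.toNat := by
  have h16 : (16:Int) ≤ val := by rw [int2fb_shl81] at h; omega
  have hs : (val + 1) >>> (1:Nat) = (val + 1) / 2 := by
    simpa using Int.shiftRight_eq_div_pow (val + 1) 1
  rw [hs]; omega

-- first while loop: returns the final (val, e)
def int2fbLoop1 (val e : Int) : Int × Int :=
  if (8:Int) <<< (4:Nat) ≤ val then int2fbLoop1 ((val + 0xf) >>> (4:Nat)) (e + 4) else (val, e)
termination_by val.toNat
decreasing_by exact int2fbDec4 val ‹_›

-- second while loop: returns the final (val, e)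
def int2fbLoop2 (val e : Int) : Int × Int :=
  if (8:Int) <<< (1:Nat) ≤ val then int2fbLoop2 ((val + 1) >>> (1:Nat)) (e + 1) else (val, e)
termination_by val.toNat
decreasing_by exact int2fbDec1 val ‹_›

def int2fb (val : Int) : Int :=
  if val < 8 then val
  else
    let p1 := int2fbLoop1 val 0
    let p2 := int2fbLoop2 p1.1 p1.2
    Int.lor ((p2.2 + 1) <<< (3:Nat)) (p2.1 - 8)

-- ===== PORT B =====
-- Source B: val.bit_length() for val > 0 is Nat.log2 + 1; Python's max(bl - 4, 0) is Nat
-- truncated subtraction; all values are nonnegative here so the Nat shifts are exact.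
def int2fb_alt (val : Int) : Int :=
  if val < 8 then val
  else
    let n := val.toNat
    let e0 := (Nat.log2 n + 1) - 4
    let e := if (15:Nat) <<< e0 < n then e0 + 1 else e0
    let m := (n + (1 <<< e) - 1) >>> e
    (((((e + 1) <<< 3) ||| (m - 8)) : Nat) : Int)

-- ===== PRECONDITION & SPEC =====
def Spec_int2fb (val : Int) (out : Int) : Prop := out = int2fb_alt val
instance (val : Int) (out : Int) : Decidable (Spec_int2fb val out) := by unfold Spec_int2fb; infer_instance

-- ===== CLAIM (what is proved, stated in full; the proofs are below) =====
def Claim_equal_int2fb : Prop := ∀ (val : Int), Dom_int2fb val → Spec_int2fb val (int2fb val)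

-- ===== LEMMAS AND PROOFS =====

-- ceiling division and its Galois connection
def pvCdiv (n d : Nat) : Nat := (n + d - 1) / d

theorem pvCdiv_le_iff {d : Nat} (hd : 0 < d) (n c : Nat) : pvCdiv n d ≤ c ↔ n ≤ d * c := by
  unfold pvCdiv; rw [Nat.div_le_iff_le_mul_add_pred hd]; omega

theorem pvCdiv_self_le {d : Nat} (hd : 0 < d) (n : Nat) : n ≤ d * pvCdiv n d :=
  (pvCdiv_le_iff hd n _).1 le_rfl

theorem pvCdiv_cdiv {a b : Nat} (ha : 0 < a) (hb : 0 < b) (n : Nat) :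
    pvCdiv (pvCdiv n a) b = pvCdiv n (a * b) := by
  have hab : 0 < a * b := Nat.mul_pos ha hb
  apply le_antisymm
  · rw [pvCdiv_le_iff hb, pvCdiv_le_iff ha, ← Nat.mul_assoc]
    exact pvCdiv_self_le hab n
  · rw [pvCdiv_le_iff hab]
    calc n ≤ a * pvCdiv n a := pvCdiv_self_le ha n
    _ ≤ a * (b * pvCdiv (pvCdiv n a) b) :=
        Nat.mul_le_mul_left a (pvCdiv_self_le hb _)
    _ = a * b * pvCdiv (pvCdiv n a) b := by ring

-- the exponent A's loops compute, in recursive form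
def pvE (n : Nat) : Nat := if n < 16 then 0 else pvE ((n + 1) / 2) + 1
termination_by n
decreasing_by omega

-- the mantissa
def pvM (n : Nat) : Nat := pvCdiv n (2 ^ pvE n)

theorem pvPow_pred (e : Nat) (h : 1 ≤ e) : 2 ^ e = 2 * 2 ^ (e - 1) := by
  conv_lhs => rw [← Nat.sub_add_cancel h]
  rw [pow_succ]; ring

theorem pvE_correct (n : Nat) (h8 : 8 ≤ n) :
    n ≤ 15 * 2 ^ pvE n ∧ (pvE n = 0 ∨ 15 * 2 ^ (pvE n - 1) < n) := by
  induction n using pvE.induct with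
  | case1 n hlt => rw [pvE, if_pos hlt]; simp; omega
  | case2 n hlt ih =>
    rw [pvE, if_neg hlt]
    have h8' : 8 ≤ (n + 1) / 2 := by omega
    obtain ⟨ih1, ih2⟩ := ih h8'
    constructor
    · have : 15 * 2 ^ (pvE ((n + 1) / 2) + 1) = 2 * (15 * 2 ^ pvE ((n + 1) / 2)) := by ring
      rw [this]; omega
    · right
      rw [Nat.add_sub_cancel]
      by_cases h0 : pvE ((n + 1) / 2) = 0
      · rw [h0]; simp; omega
      · have := pvPow_pred (pvE ((n + 1) / 2)) (by omega)
        rcases ih2 with h0' | h1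
        · exact absurd h0' h0
        · omega

theorem pvM_bounds (n : Nat) (h8 : 8 ≤ n) : 8 ≤ pvM n ∧ pvM n ≤ 15 := by
  obtain ⟨h1, h2⟩ := pvE_correct n h8
  have hp : 0 < 2 ^ pvE n := Nat.two_pow_pos _
  constructor
  · by_contra h
    have : pvM n ≤ 7 := by omega
    rw [pvM, pvCdiv_le_iff hp] at this
    by_cases h0 : pvE n = 0
    · rw [h0] at this; simp at this; omega
    · have hpp := pvPow_pred (pvE n) (by omega)
      rcases h2 with h0' | hlt
      · exact absurd h0' h0
      · omega
  · rw [pvM, pvCdiv_le_iff hp]; omega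

theorem pvE_unique (n e : Nat) (h8 : 8 ≤ n) (h1 : n ≤ 15 * 2 ^ e)
    (h2 : e = 0 ∨ 15 * 2 ^ (e - 1) < n) : e = pvE n := by
  obtain ⟨hE1, hE2⟩ := pvE_correct n h8
  rcases Nat.lt_trichotomy e (pvE n) with h | h | h
  · exfalso
    rcases hE2 with h0 | hlt
    · omega
    · have : 15 * 2 ^ e ≤ 15 * 2 ^ (pvE n - 1) :=
        Nat.mul_le_mul_left 15 (Nat.pow_le_pow_right (by norm_num) (by omega))
      omega
  · exact h
  · exfalso
    rcases h2 with h0 | hlt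
    · omega
    · have : 15 * 2 ^ pvE n ≤ 15 * 2 ^ (e - 1) :=
        Nat.mul_le_mul_left 15 (Nat.pow_le_pow_right (by norm_num) (by omega))
      omega

-- cast helpers
theorem int2fb_lor_cast (a b : Nat) : Int.lor (a : Int) (b : Int) = ((a ||| b : Nat) : Int) := rfl

theorem int2fb_shr_cast (m k : Nat) : ((m : Int)) >>> k = ((m >>> k : Nat) : Int) := rfl

-- A's second loop computes (pvM, e + pvE)
theorem int2fbLoop2_eq (n : Nat) (h8 : 8 ≤ n) (e : Int) :
    int2fbLoop2 (n : Int) e = ((pvM n : Int), e + (pvE n : Int)) := by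
  induction n using pvE.induct generalizing e with
  | case1 n hlt =>
    rw [int2fbLoop2, if_neg (by rw [int2fb_shl81]; omega)]
    have hE : pvE n = 0 := by rw [pvE, if_pos hlt]
    have hM : pvM n = n := by rw [pvM, hE]; simp [pvCdiv]
    rw [hE, hM]; simp
  | case2 n hlt ih =>
    rw [int2fbLoop2, if_pos (by rw [int2fb_shl81]; omega)]
    have harg : ((n : Int) + 1) >>> (1:Nat) = (((n + 1) / 2 : Nat) : Int) := by
      rw [show ((n:Int) + 1) = ((n + 1 : Nat) : Int) by push_cast; ring, int2fb_shr_cast]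
      norm_num [Nat.shiftRight_eq_div_pow]
    rw [harg, ih (by omega) (e + 1)]
    have hE : pvE n = pvE ((n + 1) / 2) + 1 := by rw [pvE, if_neg hlt]
    have hM : pvM n = pvM ((n + 1) / 2) := by
      rw [pvM, pvM, hE]
      have hc : (n + 1) / 2 = pvCdiv n 2 := by simp [pvCdiv]
      rw [hc, pvCdiv_cdiv (by norm_num) (Nat.two_pow_pos _), pow_succ]
      ring_nf
    rw [hE, hM]; push_cast; ring_nf

-- E steps by 4 on a division by 16
theorem pvE_step16 (n : Nat) (h : 128 ≤ n) : pvE n = pvE ((n + 15) / 16) + 4 := by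
  have e1 : pvE n = pvE ((n + 1) / 2) + 1 := by rw [pvE]; rw [if_neg (by omega)]
  have e2 : pvE ((n + 1) / 2) = pvE (((n + 1) / 2 + 1) / 2) + 1 := by
    rw [pvE]; rw [if_neg (by omega)]
  have e3 : pvE (((n + 1) / 2 + 1) / 2) = pvE ((((n + 1) / 2 + 1) / 2 + 1) / 2) + 1 := by
    rw [pvE]; rw [if_neg (by omega)]
  have e4 : pvE ((((n + 1) / 2 + 1) / 2 + 1) / 2)
      = pvE (((((n + 1) / 2 + 1) / 2 + 1) / 2 + 1) / 2) + 1 := by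
    rw [pvE]; rw [if_neg (by omega)]
  have harg : ((((n + 1) / 2 + 1) / 2 + 1) / 2 + 1) / 2 = (n + 15) / 16 := by omega
  rw [e1, e2, e3, e4, harg]

-- A's first loop followed by the second computes (pvM, e + pvE)
theorem int2fbLoop12_eq (n : Nat) (h8 : 8 ≤ n) (e : Int) :
    int2fbLoop2 (int2fbLoop1 (n : Int) e).1 (int2fbLoop1 (n : Int) e).2
      = ((pvM n : Int), e + (pvE n : Int)) := by
  induction n using Nat.strong_induction_on generalizing e with
  | _ n ih =>
  by_cases h : 128 ≤ n
  · rw [int2fbLoop1, if_pos (by rw [int2fb_shl84]; omega)]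
    have harg : ((n : Int) + 0xf) >>> (4:Nat) = (((n + 15) / 16 : Nat) : Int) := by
      rw [show ((n:Int) + 0xf) = ((n + 15 : Nat) : Int) by push_cast; norm_num, int2fb_shr_cast]
      norm_num [Nat.shiftRight_eq_div_pow]
    rw [harg, ih ((n + 15) / 16) (by omega) (by omega) (e + 4)]
    have hE : pvE n = pvE ((n + 15) / 16) + 4 := pvE_step16 n h
    have hM : pvM n = pvM ((n + 15) / 16) := by
      rw [pvM, pvM, hE]
      have hc : (n + 15) / 16 = pvCdiv n 16 := by simp [pvCdiv]
      rw [hc, pvCdiv_cdiv (by norm_num) (Nat.two_pow_pos _),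
        show (16:Nat) * 2 ^ pvE (pvCdiv n 16) = 2 ^ (pvE (pvCdiv n 16) + 4) by rw [pow_add]; ring]
    rw [hE, hM]; push_cast; ring_nf
  · rw [int2fbLoop1, if_neg (by rw [int2fb_shl84]; omega)]
    exact int2fbLoop2_eq n h8 e

-- B's exponent equals pvE
theorem int2fb_alt_e_eq (n : Nat) (h8 : 8 ≤ n) :
    (if (15:Nat) <<< ((Nat.log2 n + 1) - 4) < n then ((Nat.log2 n + 1) - 4) + 1
     else (Nat.log2 n + 1) - 4) = pvE n := by
  have hn0 : n ≠ 0 := by omega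
  have hlog3 : 3 ≤ Nat.log2 n := by
    have h := Nat.lt_log2_self (n := n)
    by_contra hc
    have h2 : 2 ^ (Nat.log2 n + 1) ≤ 2 ^ 3 := Nat.pow_le_pow_right (by norm_num) (by omega)
    norm_num at h2
    omega
  set e0 := (Nat.log2 n + 1) - 4 with he0
  have hlog : Nat.log2 n = e0 + 3 := by omega
  have hub : n < 2 ^ (e0 + 4) := by
    have := Nat.lt_log2_self (n := n); rw [hlog] at this
    convert this using 2
  have hlb : 2 ^ (e0 + 3) ≤ n := by
    have := Nat.log2_self_le hn0; rwa [hlog] at this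
  rw [Nat.shiftLeft_eq]
  split_ifs with hcond
  · apply pvE_unique n (e0 + 1) h8
    · have h1 : (2:Nat) ^ (e0 + 4) = 16 * 2 ^ e0 := by rw [pow_add]; ring
      have h2 : 15 * (2:Nat) ^ (e0 + 1) = 30 * 2 ^ e0 := by rw [pow_add]; ring
      omega
    · right; simpa using hcond
  · apply pvE_unique n e0 h8
    · omega
    · rcases Nat.eq_zero_or_pos e0 with h0 | hpos
      · left; exact h0
      · right
        have h1 : (2:Nat) ^ (e0 + 3) = 16 * 2 ^ (e0 - 1) := by
          rw [show e0 + 3 = (e0 - 1) + 4 by omega, pow_add]; ring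
        have h2 : 15 * (2:Nat) ^ (e0 - 1) < 16 * 2 ^ (e0 - 1) := by
          have : 0 < (2:Nat) ^ (e0 - 1) := Nat.two_pow_pos _
          omega
        omega

-- ===== VERDICT (by name: the statement is the Claim_ definition above) =====
theorem int2fb_spec : Claim_equal_int2fb := by
  unfold Claim_equal_int2fb Spec_int2fb
  intro val _
  by_cases hlt : val < 8
  · rw [int2fb, if_pos hlt, int2fb_alt, if_pos hlt]
  · have hpos : (0:Int) ≤ val := by omega
    have hval : ((val.toNat : Nat) : Int) = val := Int.toNat_of_nonneg hpos
    set n := val.toNat with hn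
    have h8 : 8 ≤ n := by omega
    rw [int2fb, if_neg hlt, int2fb_alt, if_neg hlt]
    simp only
    rw [← hval, int2fbLoop12_eq n h8 0]
    simp only [Int.toNat_natCast]
    simp only [zero_add]
    rw [int2fb_alt_e_eq n h8]
    have hp : 0 < 2 ^ pvE n := Nat.two_pow_pos _
    have hm : (n + 1 <<< pvE n - 1) >>> pvE n = pvM n := by
      rw [Nat.shiftLeft_eq, Nat.shiftRight_eq_div_pow, pvM, pvCdiv]; norm_num
    rw [hm]
    obtain ⟨hM8, _⟩ := pvM_bounds n h8
    rw [show ((pvE n : Int) + 1) = ((pvE n + 1 : Nat) : Int) by push_cast; ring,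
      show ((pvM n : Int) - 8) = ((pvM n - 8 : Nat) : Int) by push_cast [hM8]; ring,
      show ((pvE n + 1 : Nat) : Int) <<< (3:Nat) = (((pvE n + 1) <<< 3 : Nat) : Int) from rfl,
      int2fb_lor_cast]
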